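-- pv_equiv track=rewrite | github.com/Carlos-Menino/Minimal_Congestion_Spanning_Tree | test_graphs.py | hypercube_graph
-- ===== SOURCE A (Python) =====
-- def hypercube_graph(n): #n is the dimension of the hypercube
--     G = [[0,1,1]]
--     for i in range(1,n):
--         G_copy = G.copy()
--         for e in G_copy:
--             G.append([e[0]+2**i,e[1]+2**i,1])
--         for j in range(2**i,2**(i+1)):
--                 G.append([j,j-2**i,1])
--     return G
-- ===== SOURCE B (Python) =====
-- def hypercube_graph(n):
--     if n <= 1:
--         return [[0, 1, 1]]
--     G = hypercube_graph(n - 1)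
--     s = 2 ** (n - 1)
--     for e in list(G):
--         G.append([e[0] + s, e[1] + s, 1])
--     for j in range(s, 2 * s):
--         G.append([j, j - s, 1])
--     return G
-- ===== Notes on version B (the rewrite author's own statement) =====
-- stated objective: alternative
-- what changed: Replaces the iterative outer dimension loop with recursion over the hypercube's recursive structure: the n-cube edge list is built from the (n-1)-cube's by appending a shifted copy of its edges and then the cross edges between the two halves.
import Mathlib
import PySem

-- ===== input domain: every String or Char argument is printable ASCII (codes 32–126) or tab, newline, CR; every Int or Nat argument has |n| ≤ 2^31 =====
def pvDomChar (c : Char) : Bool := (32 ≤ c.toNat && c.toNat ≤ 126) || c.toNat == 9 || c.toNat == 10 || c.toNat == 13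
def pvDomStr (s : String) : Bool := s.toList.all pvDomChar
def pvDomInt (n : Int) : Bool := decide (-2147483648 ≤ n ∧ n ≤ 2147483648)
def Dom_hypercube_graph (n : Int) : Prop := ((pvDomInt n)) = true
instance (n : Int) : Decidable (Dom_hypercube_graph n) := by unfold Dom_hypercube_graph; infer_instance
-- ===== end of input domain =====

-- B replaces the iterative dimension loop by recursion over the hypercube's recursive structure (same edge list, same order).
-- ===== PORT A =====
-- e[0]/e[1] ported as pyGetD with default 0: every edge in G is a 3-element list, so the lookup never misses.
def hypercube_graph (n : Int) : List (List Int) :=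
  (PySem.List.pyRange 1 n 1).foldl (fun G i =>
    (G ++ G.map (fun e =>
        [PySem.List.pyGetD e 0 0 + 2 ^ i.toNat, PySem.List.pyGetD e 1 0 + 2 ^ i.toNat, 1]))
      ++ (PySem.List.pyRange (2 ^ i.toNat) (2 ^ (i + 1).toNat) 1).map
          (fun j => [j, j - 2 ^ i.toNat, 1]))
    [[0, 1, 1]]

-- ===== PORT B =====
def hypercube_graph_alt (n : Int) : List (List Int) :=
  if n ≤ 1 then [[0, 1, 1]]
  else
    let G := hypercube_graph_alt (n - 1)
    let s : Int := 2 ^ (n - 1).toNat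
    (G ++ G.map (fun e =>
        [PySem.List.pyGetD e 0 0 + s, PySem.List.pyGetD e 1 0 + s, 1]))
      ++ (PySem.List.pyRange s (2 * s) 1).map (fun j => [j, j - s, 1])
termination_by n.toNat
decreasing_by omega

-- ===== PRECONDITION & SPEC =====
def Spec_hypercube_graph (n : Int) (out : List (List Int)) : Prop := out = hypercube_graph_alt n
instance (n : Int) (out : List (List Int)) : Decidable (Spec_hypercube_graph n out) := by unfold Spec_hypercube_graph; infer_instance

-- ===== CLAIM (what is proved, stated in full; the proofs are below) =====
def Claim_equal_hypercube_graph : Prop := ∀ (n : Int), Dom_hypercube_graph n → Spec_hypercube_graph n (hypercube_graph n)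

-- ===== LEMMAS AND PROOFS =====

-- ===== VERDICT (by name: the statement is the Claim_ definition above) =====
theorem hc_eq : ∀ (n : Int), hypercube_graph n = hypercube_graph_alt n := by
  intro n
  induction n using hypercube_graph_alt.induct with
  | case1 n h =>
    rw [hypercube_graph_alt]
    simp only [h, if_true]
    unfold hypercube_graph
    rw [PySem.List.pyRange_one_eq_nil (by omega)]
    rfl
  | case2 n h ih =>
    rw [hypercube_graph_alt]
    simp only [h, if_false]
    unfold hypercube_graph
    have hr : PySem.List.pyRange 1 n 1 = PySem.List.pyRange 1 (n - 1) 1 ++ [n - 1] := by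
      have := PySem.List.pyRange_one_succ_right (a := 1) (b := n - 1) (by omega)
      simpa [show n - 1 + 1 = n by ring] using this
    rw [hr, List.foldl_append]
    show _ = _
    rw [show (PySem.List.pyRange 1 (n - 1) 1).foldl _ [[0,1,1]] = hypercube_graph (n-1) from rfl,
        ih]
    have h1 : (n - 1 + 1).toNat = (n - 1).toNat + 1 := by omega
    have h2 : (2 : Int) ^ (n - 1 + 1).toNat = 2 * 2 ^ (n - 1).toNat := by
      rw [h1, pow_succ]; ring
    simp only [List.foldl_cons, List.foldl_nil, h2]

theorem hypercube_graph_spec : Claim_equal_hypercube_graph := by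
  intro n _
  unfold Spec_hypercube_graph
  exact hc_eq n
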